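-- pv_equiv track=rewrite | github.com/myeongu/for_test | 네이버 부스트캠프/순환소수 짧게 표현하기.py | is_circulated
-- ===== SOURCE A (Python) =====
-- def is_circulated(p, q):
--     while q % 2 == 0 or q % 5 == 0:
--         if q % 2 == 0:
--             q = q // 2
--         if q % 5 == 0:
--             q = q // 5
--
--     if p % q == 0:
--         return True
--
--     return False
-- ===== SOURCE B (Python) =====
-- def is_circulated(p, q):
--     # Simulate decimal long division: p/q terminates iff the remainder hits 0
--     # within bit_length(q) digit steps (enough to absorb every 2/5 factor of q).
--     r = p % q
--     for _ in range(q.bit_length()):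
--         if r == 0:
--             break
--         r = r * 10 % q
--     return r == 0
-- ===== Notes on version B (the rewrite author's own statement) =====
-- stated objective: alternative
-- what changed: B never factors the denominator at all: instead of A's loop dividing 2s and 5s out of q and testing p % q' == 0, B simulates decimal long division on the numerator, iterating r = r*10 % q for bit_length(q) steps and answering whether the remainder reaches 0.
-- outside the precondition, e.g. on is_circulated(3, 0): A does not finish within the time limit, B raises ZeroDivisionError
import Mathlib
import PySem

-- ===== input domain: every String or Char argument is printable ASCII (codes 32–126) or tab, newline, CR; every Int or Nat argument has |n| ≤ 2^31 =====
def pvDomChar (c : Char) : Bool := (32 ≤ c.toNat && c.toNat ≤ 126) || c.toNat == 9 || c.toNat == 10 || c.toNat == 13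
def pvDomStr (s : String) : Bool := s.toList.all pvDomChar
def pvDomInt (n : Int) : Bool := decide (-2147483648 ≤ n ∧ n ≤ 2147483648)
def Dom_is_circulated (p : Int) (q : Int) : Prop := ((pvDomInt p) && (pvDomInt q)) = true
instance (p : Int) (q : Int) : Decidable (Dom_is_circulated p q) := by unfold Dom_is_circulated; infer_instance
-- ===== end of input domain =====

-- B simulates decimal long division on the numerator (r = r*10 % q, bit_length(q) steps)
-- instead of A's factoring 2s and 5s out of the denominator (alternative algorithm, similar
-- cost); at q = 0 A loops forever and B raises ZeroDivisionError (excluded by Pre_).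


-- ===== PORT A =====
-- one pass of A's while-body: divide out a 2 if q % 2 == 0, then a 5 if (the new) q % 5 == 0
def stripAStep (q : Int) : Int :=
  let q1 := if PySem.Int.mod q 2 = 0 then PySem.Int.floordiv q 2 else q
  if PySem.Int.mod q1 5 = 0 then PySem.Int.floordiv q1 5 else q1

-- A's while loop; the fuel argument is a totality guard only (each real iteration shrinks
-- |q|, see pv_stripAStep_lt below; Python loops forever at q = 0, which Pre_ excludes)
def stripAFuel : Nat → Int → Int
  | 0, q => q
  | fuel + 1, q =>
    if PySem.Int.mod q 2 = 0 ∨ PySem.Int.mod q 5 = 0 then stripAFuel fuel (stripAStep q)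
    else q

def is_circulated (p : Int) (q : Int) : Bool :=
  let q' := stripAFuel (q.natAbs + 1) q
  if PySem.Int.mod p q' = 0 then true else false

-- ===== PORT B =====
-- Source B's for-loop over range(q.bit_length()) with its early break at r == 0
def divLoop : Nat → Int → Int → Int
  | 0, _, r => r
  | k + 1, q, r => if r = 0 then r else divLoop k q (PySem.Int.mod (r * 10) q)

def is_circulated_alt (p : Int) (q : Int) : Bool :=
  decide (divLoop (PySem.Int.bitLength q) q (PySem.Int.mod p q) = 0)

-- ===== PRECONDITION & SPEC =====
-- Pre_ excludes q = 0, on which A's while loop never terminates (and B raises ZeroDivisionError).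
def Pre_is_circulated (p : Int) (q : Int) : Prop := q ≠ 0
instance (p : Int) (q : Int) : Decidable (Pre_is_circulated p q) := by unfold Pre_is_circulated; infer_instance
def pvWitness_is_circulated : Int × Int := (7, 12)

def Spec_is_circulated (p : Int) (q : Int) (out : Bool) : Prop := out = is_circulated_alt p q
instance (p : Int) (q : Int) (out : Bool) : Decidable (Spec_is_circulated p q out) := by unfold Spec_is_circulated; infer_instance

-- ===== CLAIM (what is proved, stated in full; the proofs are below) =====
def Claim_equal_is_circulated : Prop := ∀ (p : Int) (q : Int), Dom_is_circulated p q → Pre_is_circulated p q → Spec_is_circulated p q (is_circulated p q)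

-- ===== LEMMAS AND PROOFS =====

theorem pv_floordiv_exact (q d : Int) (h : d ∣ q) :
    PySem.Int.floordiv q d * d = q := by
  have hm : PySem.Int.mod q d = 0 := (PySem.Int.mod_eq_zero_iff_dvd q d).mpr h
  have := PySem.Int.floordiv_mul_add_mod q d
  omega

-- dividing a nonzero q by a divisor > 1 shrinks |q|
theorem pv_strip_step_lt (q d : Int) (hq : q ≠ 0) (hd : 1 < d) (h : d ∣ q) :
    (PySem.Int.floordiv q d).natAbs < q.natAbs := by
  have he := pv_floordiv_exact q d h
  have hr : PySem.Int.floordiv q d ≠ 0 := by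
    intro h0; rw [h0] at he; simp at he; omega
  have habs : (PySem.Int.floordiv q d).natAbs * d.natAbs = q.natAbs := by
    rw [← Int.natAbs_mul, he]
  have h1 : 1 ≤ (PySem.Int.floordiv q d).natAbs := Nat.one_le_iff_ne_zero.mpr (Int.natAbs_ne_zero.mpr hr)
  have h2 : 2 ≤ d.natAbs := by omega
  calc (PySem.Int.floordiv q d).natAbs
      < (PySem.Int.floordiv q d).natAbs * 2 := by omega
    _ ≤ (PySem.Int.floordiv q d).natAbs * d.natAbs := Nat.mul_le_mul_left _ h2
    _ = q.natAbs := habs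

theorem pv_stripAStep_lt (q : Int) (hq : q ≠ 0)
    (h : PySem.Int.mod q 2 = 0 ∨ PySem.Int.mod q 5 = 0) :
    (stripAStep q).natAbs < q.natAbs := by
  unfold stripAStep
  rcases h with h2 | h5
  · have hd2 : (2:Int) ∣ q := (PySem.Int.mod_eq_zero_iff_dvd q 2).mp h2
    have hlt1 := pv_strip_step_lt q 2 hq (by norm_num) hd2
    simp only [h2, if_true]
    split
    · rename_i h5'
      have hd5 : (5:Int) ∣ PySem.Int.floordiv q 2 := (PySem.Int.mod_eq_zero_iff_dvd _ 5).mp h5'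
      have hne : PySem.Int.floordiv q 2 ≠ 0 := by
        intro h0
        have := pv_floordiv_exact q 2 hd2; rw [h0] at this; simp at this; omega
      exact lt_trans (pv_strip_step_lt _ 5 hne (by norm_num) hd5) hlt1
    · exact hlt1
  · by_cases h2 : PySem.Int.mod q 2 = 0
    · have hd2 : (2:Int) ∣ q := (PySem.Int.mod_eq_zero_iff_dvd q 2).mp h2
      have hlt1 := pv_strip_step_lt q 2 hq (by norm_num) hd2
      simp only [h2, if_true]
      split
      · rename_i h5'
        have hd5 : (5:Int) ∣ PySem.Int.floordiv q 2 := (PySem.Int.mod_eq_zero_iff_dvd _ 5).mp h5'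
        have hne : PySem.Int.floordiv q 2 ≠ 0 := by
          intro h0
          have := pv_floordiv_exact q 2 hd2; rw [h0] at this; simp at this; omega
        exact lt_trans (pv_strip_step_lt _ 5 hne (by norm_num) hd5) hlt1
      · exact hlt1
    · have hd5 : (5:Int) ∣ q := (PySem.Int.mod_eq_zero_iff_dvd q 5).mp h5
      simp only [h2, if_false, h5, if_true]
      exact pv_strip_step_lt q 5 hq (by norm_num) hd5

-- A's loop result d satisfies: 2 ∤ d, 5 ∤ d, and q = d * 2^a * 5^b for some a, b
def StripSpec (q d : Int) : Prop :=
  ¬ (2:Int) ∣ d ∧ ¬ (5:Int) ∣ d ∧ ∃ a b : ℕ, q = d * 2 ^ a * 5 ^ b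

theorem stripAStep_decomp (q : Int) : ∃ a b : ℕ, q = stripAStep q * 2 ^ a * 5 ^ b := by
  unfold stripAStep
  by_cases h2 : PySem.Int.mod q 2 = 0
  · have he2 := pv_floordiv_exact q 2 ((PySem.Int.mod_eq_zero_iff_dvd q 2).mp h2)
    simp only [h2, if_true]
    by_cases h5 : PySem.Int.mod (PySem.Int.floordiv q 2) 5 = 0
    · have he5 := pv_floordiv_exact _ 5 ((PySem.Int.mod_eq_zero_iff_dvd _ 5).mp h5)
      refine ⟨1, 1, ?_⟩
      simp only [h5, if_true, pow_one]
      nlinarith [he2, he5]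
    · refine ⟨1, 0, ?_⟩
      simp only [h5, if_false, pow_one, pow_zero, mul_one]
      linarith [he2]
  · simp only [h2, if_false]
    by_cases h5 : PySem.Int.mod q 5 = 0
    · have he5 := pv_floordiv_exact q 5 ((PySem.Int.mod_eq_zero_iff_dvd q 5).mp h5)
      refine ⟨0, 1, ?_⟩
      simp only [h5, if_true, pow_zero, pow_one, mul_one]
      linarith [he5]
    · refine ⟨0, 0, ?_⟩
      simp only [h5, if_false, pow_zero, mul_one]

theorem stripAFuel_spec (fuel : Nat) (q : Int) (hq : q ≠ 0) (hf : q.natAbs < fuel) :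
    StripSpec q (stripAFuel fuel q) := by
  induction fuel generalizing q with
  | zero => omega
  | succ n ih =>
    by_cases h : PySem.Int.mod q 2 = 0 ∨ PySem.Int.mod q 5 = 0
    · simp only [stripAFuel, if_pos h]
      obtain ⟨a0, b0, hdec⟩ := stripAStep_decomp q
      have hstep : stripAStep q ≠ 0 := by
        intro h0; rw [h0] at hdec; simp at hdec; exact hq hdec
      have hlt := pv_stripAStep_lt q hq h
      obtain ⟨hn2, hn5, a, b, hd⟩ := ih (stripAStep q) hstep (by omega)
      refine ⟨hn2, hn5, a + a0, b + b0, ?_⟩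
      generalize stripAFuel n (stripAStep q) = d at hd ⊢
      rw [hdec, hd, pow_add, pow_add]; ring
    · simp only [stripAFuel, if_neg h]
      push_neg at h
      refine ⟨?_, ?_, 0, 0, by ring⟩
      · intro hd; exact h.1 ((PySem.Int.mod_eq_zero_iff_dvd q 2).mpr hd)
      · intro hd; exact h.2 ((PySem.Int.mod_eq_zero_iff_dvd q 5).mpr hd)

-- floor-mod ignores multiples of the divisor
theorem pv_mod_add_mul (x m q : Int) (hq : q ≠ 0) :
    PySem.Int.mod (x + m * q) q = PySem.Int.mod x q := by
  have h1 := PySem.Int.floordiv_mul_add_mod (x + m * q) q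
  have h2 := PySem.Int.floordiv_mul_add_mod x q
  set r1 := PySem.Int.mod (x + m * q) q
  set r2 := PySem.Int.mod x q
  have hdvd : q ∣ (r1 - r2) := ⟨PySem.Int.floordiv x q + m - PySem.Int.floordiv (x + m * q) q, by linarith [h1, h2, mul_comm q (PySem.Int.floordiv x q + m - PySem.Int.floordiv (x + m * q) q)]⟩
  have hbound : |r1 - r2| < |q| := by
    rcases lt_or_gt_of_ne hq with hneg | hpos
    · have b1 := PySem.Int.mod_neg_bounds (x + m * q) hneg
      have b2 := PySem.Int.mod_neg_bounds x hneg
      rw [abs_of_neg hneg]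
      rw [abs_lt]; constructor <;> [linarith [b1.1, b2.2]; linarith [b1.2, b2.1]]
    · have a1 := PySem.Int.mod_nonneg (x + m * q) hpos
      have a2 := PySem.Int.mod_nonneg x hpos
      have l1 := PySem.Int.mod_lt (x + m * q) hpos
      have l2 := PySem.Int.mod_lt x hpos
      rw [abs_of_pos hpos, abs_lt]; omega
  have : r1 - r2 = 0 := Int.eq_zero_of_abs_lt_dvd ((abs_dvd q _).mpr hdvd) hbound
  omega

-- B's loop computes the remainder of p * 10^k (the early break is absorbing: 0 stays 0)
theorem divLoop_eq (k : Nat) (s q : Int) (hq : q ≠ 0) :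
    divLoop k q (PySem.Int.mod s q) = PySem.Int.mod (s * 10 ^ k) q := by
  induction k generalizing s with
  | zero => simp [divLoop]
  | succ n ih =>
    simp only [divLoop]
    by_cases h0 : PySem.Int.mod s q = 0
    · have hdvd : q ∣ s := (PySem.Int.mod_eq_zero_iff_dvd s q).mp h0
      rw [if_pos h0, h0]
      exact ((PySem.Int.mod_eq_zero_iff_dvd _ q).mpr (Dvd.dvd.mul_right hdvd _)).symm
    · rw [if_neg h0]
      have hstep : PySem.Int.mod (PySem.Int.mod s q * 10) q = PySem.Int.mod (s * 10) q := by
        have h2 := PySem.Int.floordiv_mul_add_mod s q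
        have : s * 10 = PySem.Int.mod s q * 10 + (PySem.Int.floordiv s q * 10) * q := by ring_nf; linarith [h2]
        rw [this, pv_mod_add_mul _ _ _ hq]
      rw [hstep, ih (s * 10)]
      congr 1; ring

-- the stripped denominator is coprime to 10
theorem pv_coprime_ten (d : Int) (h2 : ¬ (2:Int) ∣ d) (h5 : ¬ (5:Int) ∣ d) :
    IsCoprime d (10:Int) := by
  rw [Int.isCoprime_iff_gcd_eq_one]
  have hdvd10 : Int.gcd d 10 ∣ 10 := by
    have : (Int.gcd d 10 : Int) ∣ (10:Int) := Int.gcd_dvd_right d 10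
    exact_mod_cast this
  have hb : Int.gcd d 10 ≤ 10 := Nat.le_of_dvd (by norm_num) hdvd10
  have hdl : (Int.gcd d 10 : Int) ∣ d := Int.gcd_dvd_left d 10
  by_contra hne
  have h2d : ¬ (2:Nat) ∣ Int.gcd d 10 := by
    intro h
    exact h2 (dvd_trans (by exact_mod_cast Int.natCast_dvd_natCast.mpr h) hdl)
  have h5d : ¬ (5:Nat) ∣ Int.gcd d 10 := by
    intro h
    exact h5 (dvd_trans (by exact_mod_cast Int.natCast_dvd_natCast.mpr h) hdl)
  interval_cases h : Int.gcd d 10 <;> revert hdvd10 hne h2d h5d <;> decide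

-- the exponents in q = q' * 2^a * 5^b are below bit_length(q)
theorem pv_exp_lt_bitLength (q d : Int) (a b : Nat) (hq : q ≠ 0)
    (hdec : q = d * 2 ^ a * 5 ^ b) :
    a < PySem.Int.bitLength q ∧ b < PySem.Int.bitLength q := by
  have hd : d ≠ 0 := by intro h0; rw [h0] at hdec; simp at hdec; exact hq hdec
  have habs : q.natAbs = d.natAbs * 2 ^ a * 5 ^ b := by
    rw [hdec]; simp [Int.natAbs_mul, Int.natAbs_pow]
  have hlt := PySem.Int.lt_two_pow_bitLength q
  have hd1 : 1 ≤ d.natAbs := Nat.one_le_iff_ne_zero.mpr (Int.natAbs_ne_zero.mpr hd)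
  have h2a : 2 ^ a ≤ q.natAbs := by
    calc 2 ^ a = 1 * 2 ^ a * 1 := by ring
      _ ≤ d.natAbs * 2 ^ a * 5 ^ b :=
          Nat.mul_le_mul (Nat.mul_le_mul hd1 (le_refl (2 ^ a))) (Nat.one_le_pow _ _ (by norm_num))
      _ = q.natAbs := habs.symm
  have h5b : 2 ^ b ≤ q.natAbs := by
    calc 2 ^ b ≤ 5 ^ b := Nat.pow_le_pow_left (by norm_num) b
      _ = 1 * 1 * 5 ^ b := by ring
      _ ≤ d.natAbs * 2 ^ a * 5 ^ b :=
          Nat.mul_le_mul (Nat.mul_le_mul hd1 (Nat.one_le_pow _ _ (by norm_num))) (le_refl (5 ^ b))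
      _ = q.natAbs := habs.symm
  constructor
  · exact (Nat.pow_lt_pow_iff_right (by norm_num : 1 < 2)).mp (lt_of_le_of_lt h2a hlt)
  · exact (Nat.pow_lt_pow_iff_right (by norm_num : 1 < 2)).mp (lt_of_le_of_lt h5b hlt)

-- the core equivalence: q' ∣ p  ↔  q ∣ p * 10^K for K = bit_length(q)
theorem pv_dvd_iff (p q : Int) (hq : q ≠ 0) :
    (stripAFuel (q.natAbs + 1) q ∣ p) ↔ (q ∣ p * 10 ^ PySem.Int.bitLength q) := by
  obtain ⟨hn2, hn5, a, b, hdec⟩ := stripAFuel_spec (q.natAbs + 1) q hq (by omega)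
  set d := stripAFuel (q.natAbs + 1) q with hd
  obtain ⟨ha, hb⟩ := pv_exp_lt_bitLength q d a b hq hdec
  set K := PySem.Int.bitLength q
  constructor
  · rintro ⟨m, hm⟩
    refine ⟨m * 2 ^ (K - a) * 5 ^ (K - b), ?_⟩
    rw [hm, hdec]
    have h2 : (2:Int) ^ a * 2 ^ (K - a) = 2 ^ K := by
      rw [← pow_add, Nat.add_sub_cancel' (le_of_lt ha)]
    have h5 : (5:Int) ^ b * 5 ^ (K - b) = 5 ^ K := by
      rw [← pow_add, Nat.add_sub_cancel' (le_of_lt hb)]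
    have h10 : (10:Int) ^ K = 2 ^ K * 5 ^ K := by
      rw [← mul_pow]; norm_num
    rw [h10, ← h2, ← h5]; ring
  · intro hdvd
    have hdq : d ∣ q := ⟨2 ^ a * 5 ^ b, by rw [hdec]; ring⟩
    have hdp10 : d ∣ p * 10 ^ K := dvd_trans hdq hdvd
    exact ((pv_coprime_ten d hn2 hn5).pow_right).dvd_of_dvd_mul_right hdp10

-- ===== VERDICT (by name: the statement is the Claim_ definition above) =====
theorem is_circulated_spec : Claim_equal_is_circulated := by
  intro p q _ hpre
  unfold Spec_is_circulated is_circulated is_circulated_alt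
  rw [divLoop_eq _ p q hpre]
  have hiff := pv_dvd_iff p q hpre
  by_cases h : PySem.Int.mod p (stripAFuel (q.natAbs + 1) q) = 0
  · have : PySem.Int.mod (p * 10 ^ PySem.Int.bitLength q) q = 0 :=
      (PySem.Int.mod_eq_zero_iff_dvd _ q).mpr (hiff.mp ((PySem.Int.mod_eq_zero_iff_dvd _ _).mp h))
    simp [h, this]
  · have : PySem.Int.mod (p * 10 ^ PySem.Int.bitLength q) q ≠ 0 := by
      intro h0
      exact h ((PySem.Int.mod_eq_zero_iff_dvd _ _).mpr (hiff.mpr ((PySem.Int.mod_eq_zero_iff_dvd _ q).mp h0)))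
    simp [h, this]
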